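-- pv_equiv track=rewrite | github.com/Wmuga/adventofcode | 2022/17/solution.py | apply_offset
-- ===== SOURCE A (Python) =====
-- ROCKS = [
-- 	['####'],
-- 	['.#.','###','.#.'],
-- 	['..#','..#','###'],
-- 	['#','#','#','#'],
-- 	["##","##"]
-- ]
--
-- WIDTH = 7
--
-- def apply_offset(rock,x,field, y,pattern):
-- 	x += pattern
-- 	if x < 0:
-- 		return 0
-- 	if x + len(ROCKS[rock][0]) > WIDTH:
-- 		return x - 1
--
-- 	for i,rock_line in enumerate(ROCKS[rock][::-1],start = y):
-- 		if i >= len(field):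
-- 			break
--
-- 		line = field[i]
-- 		if line == 0:
-- 			continue
--
-- 		for x1, pix in enumerate(rock_line, start=x):
-- 			if pix == '#' and line & (1<<(WIDTH - x1 - 1)) != 0:
-- 				return x - pattern
--
-- 	return x
-- ===== SOURCE B (Python) =====
-- WIDTH = 7
--
-- ROCKS = [
--     ['####'],
--     ['.#.', '###', '.#.'],
--     ['..#', '..#', '###'],
--     ['#', '#', '#', '#'],
--     ["##", "##"]
-- ]
--
--
-- def _line_mask(line):
--     m = 0
--     for j, c in enumerate(line):
--         if c == '#':
--             m |= 1 << (WIDTH - j - 1)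
--     return m
--
--
-- # Per-rock tables precomputed once: bottom-up bit masks (anchored at x = 0) and widths.
-- ROCK_MASKS = [[_line_mask(line) for line in reversed(r)] for r in ROCKS]
-- ROCK_WIDTHS = [len(r[0]) for r in ROCKS]
--
--
-- def apply_offset(rock, x, field, y, pattern):
--     x += pattern
--     if x < 0:
--         return 0
--     if x + ROCK_WIDTHS[rock] > WIDTH:
--         return x - 1
--     n = len(field)
--     i = y
--     for base in ROCK_MASKS[rock]:
--         if i >= n:
--             break
--         if field[i] & (base >> x):
--             return x - pattern
--         i += 1
--     return x
-- ===== Notes on version B (the rewrite author's own statement) =====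
-- stated objective: alternative
-- what changed: Replaces the per-pixel inner loop (char scan testing one bit per '#' pixel) by per-rock bitmask and width tables precomputed once at module load; each rock line is collision-tested with a single AND of the field row against the line's mask shifted by the offset.
import Mathlib
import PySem

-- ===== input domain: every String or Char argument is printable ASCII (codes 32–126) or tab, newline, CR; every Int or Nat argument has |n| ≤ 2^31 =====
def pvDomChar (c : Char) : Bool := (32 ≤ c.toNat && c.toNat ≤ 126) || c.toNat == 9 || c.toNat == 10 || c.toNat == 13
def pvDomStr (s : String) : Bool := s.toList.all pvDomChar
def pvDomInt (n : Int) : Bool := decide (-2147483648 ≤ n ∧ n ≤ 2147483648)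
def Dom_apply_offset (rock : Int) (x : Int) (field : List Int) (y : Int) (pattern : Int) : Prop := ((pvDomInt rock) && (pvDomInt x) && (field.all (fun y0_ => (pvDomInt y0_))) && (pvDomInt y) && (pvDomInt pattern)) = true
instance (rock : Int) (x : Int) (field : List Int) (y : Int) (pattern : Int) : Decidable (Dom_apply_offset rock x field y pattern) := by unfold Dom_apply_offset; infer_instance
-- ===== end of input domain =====

-- B replaces the per-pixel bit test in A's inner loop by per-rock-line integer bitmask and
-- width tables precomputed once at module level: each rock line is collision-tested with a
-- single shifted-mask AND; equivalence is about the return value (neither version mutates).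

-- ===== PORT A =====
def pvROCKS : List (List String) :=
  [["####"], [".#.", "###", ".#."], ["..#", "..#", "###"], ["#", "#", "#", "#"], ["##", "##"]]

-- inner loop: for x1, pix in enumerate(rock_line, start=x)
-- shift amount (7 - x1 - 1) is nonnegative whenever the test is evaluated (x1 ≤ 6 under the
-- width sentinel), so `.toNat` is exact there
def pvCheckA (chars : List Char) (x1 : Int) (line : Int) : Bool :=
  match chars with
  | [] => false
  | c :: rest =>
    if c = '#' ∧ PySem.Int.band line ((1 : Int) <<< (7 - x1 - 1).toNat) ≠ 0 then true
    else pvCheckA rest (x1 + 1) line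

-- outer loop: for i, rock_line in enumerate(ROCKS[rock][::-1], start=y)
def pvLoopA (lines : List String) (field : List Int) (x : Int) (pattern : Int) (i : Int) : Int :=
  match lines with
  | [] => x
  | l :: rest =>
    if (field.length : Int) ≤ i then x          -- if i >= len(field): break
    else
      match PySem.List.pyGet? field i with      -- line = field[i]
      | none => 0                                -- IndexError (i < -len); outside Pre_
      | some line =>
        if line = 0 then pvLoopA rest field x pattern (i + 1)
        else if pvCheckA l.toList x line then x - pattern
        else pvLoopA rest field x pattern (i + 1)

def apply_offset (rock : Int) (x : Int) (field : List Int) (y : Int) (pattern : Int) : Int :=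
  let x := x + pattern
  if x < 0 then 0
  else
    match PySem.List.pyGet? pvROCKS rock with    -- ROCKS[rock]
    | none => 0                                  -- IndexError; outside Pre_
    | some lines =>
      match PySem.List.pyGet? lines 0 with       -- ROCKS[rock][0] (every rock is nonempty)
      | none => 0
      | some l0 =>
        if 7 < x + (PySem.Str.len l0 : Int) then x - 1
        -- ROCKS[rock][::-1] is the reversal of the list
        else pvLoopA lines.reverse field x pattern y

-- ===== PORT B =====
-- def _line_mask(line): m = 0; for j, c in enumerate(line): if c == '#': m |= 1 << (7 - j - 1)
-- (shift amount nonnegative on every rock line, so `.toNat` is exact)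
def pvLineMaskGo (chars : List Char) (j : Int) (m : Int) : Int :=
  match chars with
  | [] => m
  | c :: rest =>
    pvLineMaskGo rest (j + 1)
      (if c = '#' then PySem.Int.bor m ((1 : Int) <<< (7 - j - 1).toNat) else m)

-- ROCK_MASKS = [[_line_mask(line) for line in reversed(r)] for r in ROCKS]
def pvROCK_MASKS : List (List Int) :=
  pvROCKS.map (fun r => r.reverse.map (fun l => pvLineMaskGo l.toList 0 0))

-- ROCK_WIDTHS = [len(r[0]) for r in ROCKS]  (every rock is nonempty)
def pvROCK_WIDTHS : List Int :=
  pvROCKS.map (fun r => ((PySem.List.pyGet? r 0).map (fun s => (PySem.Str.len s : Int))).getD 0)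

-- for base in ROCK_MASKS[rock]: …  (x ≥ 0 here, so `x.toNat` shift is exact)
def pvLoopB (masks : List Int) (field : List Int) (x : Int) (pattern : Int) (i : Int) : Int :=
  match masks with
  | [] => x
  | base :: rest =>
    if (field.length : Int) ≤ i then x          -- if i >= n: break
    else
      match PySem.List.pyGet? field i with
      | none => 0                                -- IndexError; outside Pre_
      | some line =>
        if PySem.Int.band line (base >>> x.toNat) ≠ 0 then x - pattern
        else pvLoopB rest field x pattern (i + 1)

def apply_offset_alt (rock : Int) (x : Int) (field : List Int) (y : Int) (pattern : Int) : Int :=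
  let x := x + pattern
  if x < 0 then 0
  else
    match PySem.List.pyGet? pvROCK_WIDTHS rock with  -- ROCK_WIDTHS[rock]
    | none => 0                                      -- IndexError; outside Pre_
    | some w =>
      if 7 < x + w then x - 1
      -- ROCK_MASKS[rock]: succeeds whenever the widths lookup did (same length tables)
      else pvLoopB ((PySem.List.pyGet? pvROCK_MASKS rock).getD []) field x pattern y

-- ===== PRECONDITION & SPEC =====
-- Pre_ excludes exactly the inputs on which the Python A raises IndexError: a rock index
-- outside [-5, 4] reached past the first sentinel, or a start row y below -len(field)
-- reached past both sentinels (negative rows wrap; below -len(field) the access raises).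
def pvPreWidths : List Int := [4, 3, 3, 1, 2]
def Pre_apply_offset (rock : Int) (x : Int) (field : List Int) (y : Int) (pattern : Int) : Prop :=
  x + pattern < 0 ∨
  (-5 ≤ rock ∧ rock ≤ 4 ∧
    (7 < x + pattern + (PySem.List.pyGet? pvPreWidths rock).getD 0 ∨ -(field.length : Int) ≤ y))
instance (rock : Int) (x : Int) (field : List Int) (y : Int) (pattern : Int) : Decidable (Pre_apply_offset rock x field y pattern) := by unfold Pre_apply_offset; infer_instance

def pvWitness_apply_offset : Int × Int × List Int × Int × Int := (1, 2, [0, 5, 64, 0], 0, 1)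

def Spec_apply_offset (rock : Int) (x : Int) (field : List Int) (y : Int) (pattern : Int) (out : Int) : Prop := out = apply_offset_alt rock x field y pattern
instance (rock : Int) (x : Int) (field : List Int) (y : Int) (pattern : Int) (out : Int) : Decidable (Spec_apply_offset rock x field y pattern out) := by unfold Spec_apply_offset; infer_instance

-- ===== CLAIM (what is proved, stated in full; the proofs are below) =====
def Claim_equal_apply_offset : Prop := ∀ (rock : Int) (x : Int) (field : List Int) (y : Int) (pattern : Int), Dom_apply_offset rock x field y pattern → Pre_apply_offset rock x field y pattern → Spec_apply_offset rock x field y pattern (apply_offset rock x field y pattern)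

-- ===== LEMMAS AND PROOFS =====

lemma pv_or_eq_zero (p q : Nat) : p ||| q = 0 ↔ p = 0 ∧ q = 0 := by
  constructor
  · intro h
    have h1 : p ≤ p ||| q := Nat.left_le_or
    have h2 : q ≤ p ||| q := Nat.right_le_or
    rw [h] at h1 h2
    omega
  · rintro ⟨rfl, rfl⟩; rfl

lemma pv_covers (m n : Nat) : m &&& n = m ↔ ∀ k, m.testBit k = true → n.testBit k = true := by
  constructor
  · intro h k hk
    have h2 := congrArg (fun t => t.testBit k) h
    simp only [Nat.testBit_and, hk, Bool.true_and] at h2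
    exact h2
  · intro h
    apply Nat.eq_of_testBit_eq
    intro k
    rw [Nat.testBit_and]
    cases hk : m.testBit k
    · simp
    · simp [h k hk]

lemma pv_covers_or (p q n : Nat) :
    (p ||| q) &&& n = p ||| q ↔ (p &&& n = p ∧ q &&& n = q) := by
  simp only [pv_covers, Nat.testBit_or]
  constructor
  · intro h
    exact ⟨fun k hk => h k (by simp [hk]), fun k hk => h k (by simp [hk])⟩
  · rintro ⟨h1, h2⟩ k hk
    rcases Bool.or_eq_true_iff.mp hk with h | h
    · exact h1 k h
    · exact h2 k h

lemma pv_band_bor_ne_zero (line a b : Int) (ha : 0 ≤ a) (hb : 0 ≤ b) :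
    PySem.Int.band line (PySem.Int.bor a b) ≠ 0 ↔
      PySem.Int.band line a ≠ 0 ∨ PySem.Int.band line b ≠ 0 := by
  rw [PySem.Int.bor_of_nonneg ha hb]
  by_cases hl : 0 ≤ line
  · rw [PySem.Int.band_of_nonneg hl (by positivity),
        PySem.Int.band_of_nonneg hl ha, PySem.Int.band_of_nonneg hl hb]
    simp only [Int.toNat_natCast, ne_eq, Int.natCast_eq_zero]
    rw [Nat.and_or_distrib_left, pv_or_eq_zero]
    tauto
  · set n := (-line - 1).toNat with hn
    have hband : ∀ c : Int, 0 ≤ c →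
        (PySem.Int.band line c ≠ 0 ↔ ¬ c.toNat &&& n = c.toNat) := by
      intro c hc
      simp only [PySem.Int.band, if_neg hl, if_pos hc, ← hn]
      have h1 : c.toNat &&& n ≤ c.toNat := Nat.and_le_left
      omega
    rw [hband _ (Int.natCast_nonneg _), hband _ ha, hband _ hb]
    simp only [Int.toNat_natCast]
    rw [not_iff_comm, not_or, not_not, not_not, pv_covers_or]

lemma pv_band_zero_left (a : Int) : PySem.Int.band 0 a = 0 := by
  rw [PySem.Int.band_comm]; exact PySem.Int.band_zero a

lemma pv_shiftLeft_nonneg (k : Nat) : (0 : Int) ≤ (1 : Int) <<< k := by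
  rw [Int.shiftLeft_eq]; positivity

-- proof-side mask: what A's inner scan tests, as one OR of single bits
def pvMaskSpec (chars : List Char) (x1 : Int) : Int :=
  match chars with
  | [] => 0
  | c :: rest =>
    PySem.Int.bor (if c = '#' then (1 : Int) <<< (7 - x1 - 1).toNat else 0)
      (pvMaskSpec rest (x1 + 1))

lemma pvMaskSpec_nonneg (chars : List Char) (x1 : Int) : 0 ≤ pvMaskSpec chars x1 := by
  induction chars generalizing x1 with
  | nil => simp [pvMaskSpec]
  | cons c rest ih =>
    simp only [pvMaskSpec]
    have h1 : (0 : Int) ≤ (if c = '#' then (1 : Int) <<< (7 - x1 - 1).toNat else 0) := by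
      split
      · exact pv_shiftLeft_nonneg _
      · exact le_refl 0
    rw [PySem.Int.bor_of_nonneg h1 (ih (x1 + 1))]
    exact Int.natCast_nonneg _

lemma pv_checkA_eq (chars : List Char) (x1 line : Int) :
    pvCheckA chars x1 line = true ↔ PySem.Int.band line (pvMaskSpec chars x1) ≠ 0 := by
  induction chars generalizing x1 with
  | nil => simp [pvCheckA, pvMaskSpec, PySem.Int.band_zero]
  | cons c rest ih =>
    simp only [pvCheckA, pvMaskSpec]
    by_cases hc : c = '#'
    · simp only [hc, true_and, if_true]
      rw [pv_band_bor_ne_zero line _ _ (pv_shiftLeft_nonneg _) (pvMaskSpec_nonneg _ _)]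
      by_cases hb : PySem.Int.band line ((1 : Int) <<< (7 - x1 - 1).toNat) ≠ 0
      · rw [if_pos hb]
        exact iff_of_true rfl (Or.inl hb)
      · rw [if_neg hb, ih]
        tauto
    · simp only [hc, if_false, false_and]
      rw [PySem.Int.bor_comm, PySem.Int.bor_zero]
      simpa using ih (x1 + 1)

lemma pv_loop_eq (x pattern : Int) (field : List Int) (lines : List String) (masks : List Int)
    (h : List.Forall₂ (fun (l : String) (m : Int) => ∀ line : Int,
          (pvCheckA l.toList x line = true) ↔ (PySem.Int.band line (m >>> x.toNat) ≠ 0))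
        lines masks) :
    ∀ i : Int, pvLoopA lines field x pattern i = pvLoopB masks field x pattern i := by
  induction h with
  | nil => intro i; rfl
  | @cons l m lines' masks' hpair _ ih =>
    intro i
    simp only [pvLoopA, pvLoopB]
    by_cases hi : (field.length : Int) ≤ i
    · simp [hi]
    · simp only [hi, if_false]
      cases hget : PySem.List.pyGet? field i with
      | none => rfl
      | some line =>
        by_cases h0 : line = 0
        · subst h0
          have : ¬ PySem.Int.band 0 (m >>> x.toNat) ≠ 0 := by simp [pv_band_zero_left]
          simp [this, ih]
        · simp only [h0, if_false]
          by_cases hc : pvCheckA l.toList x line = true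
          · simp [hc, (hpair line).mp hc]
          · have hb : ¬ PySem.Int.band line (m >>> x.toNat) ≠ 0 := fun hb => hc ((hpair line).mpr hb)
            simp [hc, hb, ih]

-- one Forall₂ pair, from a decidable mask identity
lemma pv_pair (l : String) (m x : Int) (h : pvMaskSpec l.toList x = m >>> x.toNat) :
    ∀ line : Int, (pvCheckA l.toList x line = true) ↔
      (PySem.Int.band line (m >>> x.toNat) ≠ 0) := by
  intro line
  rw [← h]
  exact pv_checkA_eq l.toList x line

-- ===== VERDICT (by name: the statement is the Claim_ definition above) =====
theorem apply_offset_spec : Claim_equal_apply_offset := by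
  intro rock x field y pattern _hdom hpre
  unfold Spec_apply_offset
  by_cases hx : x + pattern < 0
  · simp [apply_offset, apply_offset_alt, hx]
  · have hrock : -5 ≤ rock ∧ rock ≤ 4 := by
      rcases hpre with h | ⟨h1, h2, _⟩
      · exact absurd h hx
      · exact ⟨h1, h2⟩
    clear hpre
    obtain ⟨h5, h4⟩ := hrock
    simp only [apply_offset, apply_offset_alt, hx, if_false]
    interval_cases rock
    · -- rock = -5
      rw [show PySem.List.pyGet? pvROCKS (-5 : Int) = some ["####"] from by decide,
          show PySem.List.pyGet? pvROCK_WIDTHS (-5 : Int) = some (4 : Int) from by decide,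
          show PySem.List.pyGet? pvROCK_MASKS (-5 : Int) = some [(120 : Int)] from by decide]
      simp only [Option.getD_some]
      rw [show PySem.List.pyGet? (["####"] : List String) (0 : Int) = some "####" from by decide]
      simp only []
      rw [show (PySem.Str.len "####" : Int) = 4 from by decide,
          show (["####"] : List String).reverse = ["####"] from by decide]
      split_ifs with hw
      · rfl
      · have h0 : 0 ≤ x + pattern := by omega
        have h1 : x + pattern ≤ 3 := by omega
        generalize hgen : x + pattern = s at h0 h1 ⊢
        interval_cases s <;>
          exact pv_loop_eq _ pattern field _ _ (by repeat first
            | exact List.Forall₂.nil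
            | refine List.Forall₂.cons (pv_pair _ _ _ (by decide)) ?_) y
    · -- rock = -4
      rw [show PySem.List.pyGet? pvROCKS (-4 : Int) = some [".#.", "###", ".#."] from by decide,
          show PySem.List.pyGet? pvROCK_WIDTHS (-4 : Int) = some (3 : Int) from by decide,
          show PySem.List.pyGet? pvROCK_MASKS (-4 : Int) = some [(32 : Int), (112 : Int), (32 : Int)] from by decide]
      simp only [Option.getD_some]
      rw [show PySem.List.pyGet? ([".#.", "###", ".#."] : List String) (0 : Int) = some ".#." from by decide]
      simp only []
      rw [show (PySem.Str.len ".#." : Int) = 3 from by decide,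
          show ([".#.", "###", ".#."] : List String).reverse = [".#.", "###", ".#."] from by decide]
      split_ifs with hw
      · rfl
      · have h0 : 0 ≤ x + pattern := by omega
        have h1 : x + pattern ≤ 4 := by omega
        generalize hgen : x + pattern = s at h0 h1 ⊢
        interval_cases s <;>
          exact pv_loop_eq _ pattern field _ _ (by repeat first
            | exact List.Forall₂.nil
            | refine List.Forall₂.cons (pv_pair _ _ _ (by decide)) ?_) y
    · -- rock = -3
      rw [show PySem.List.pyGet? pvROCKS (-3 : Int) = some ["..#", "..#", "###"] from by decide,
          show PySem.List.pyGet? pvROCK_WIDTHS (-3 : Int) = some (3 : Int) from by decide,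
          show PySem.List.pyGet? pvROCK_MASKS (-3 : Int) = some [(112 : Int), (16 : Int), (16 : Int)] from by decide]
      simp only [Option.getD_some]
      rw [show PySem.List.pyGet? (["..#", "..#", "###"] : List String) (0 : Int) = some "..#" from by decide]
      simp only []
      rw [show (PySem.Str.len "..#" : Int) = 3 from by decide,
          show (["..#", "..#", "###"] : List String).reverse = ["###", "..#", "..#"] from by decide]
      split_ifs with hw
      · rfl
      · have h0 : 0 ≤ x + pattern := by omega
        have h1 : x + pattern ≤ 4 := by omega
        generalize hgen : x + pattern = s at h0 h1 ⊢
        interval_cases s <;>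
          exact pv_loop_eq _ pattern field _ _ (by repeat first
            | exact List.Forall₂.nil
            | refine List.Forall₂.cons (pv_pair _ _ _ (by decide)) ?_) y
    · -- rock = -2
      rw [show PySem.List.pyGet? pvROCKS (-2 : Int) = some ["#", "#", "#", "#"] from by decide,
          show PySem.List.pyGet? pvROCK_WIDTHS (-2 : Int) = some (1 : Int) from by decide,
          show PySem.List.pyGet? pvROCK_MASKS (-2 : Int) = some [(64 : Int), (64 : Int), (64 : Int), (64 : Int)] from by decide]
      simp only [Option.getD_some]
      rw [show PySem.List.pyGet? (["#", "#", "#", "#"] : List String) (0 : Int) = some "#" from by decide]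
      simp only []
      rw [show (PySem.Str.len "#" : Int) = 1 from by decide,
          show (["#", "#", "#", "#"] : List String).reverse = ["#", "#", "#", "#"] from by decide]
      split_ifs with hw
      · rfl
      · have h0 : 0 ≤ x + pattern := by omega
        have h1 : x + pattern ≤ 6 := by omega
        generalize hgen : x + pattern = s at h0 h1 ⊢
        interval_cases s <;>
          exact pv_loop_eq _ pattern field _ _ (by repeat first
            | exact List.Forall₂.nil
            | refine List.Forall₂.cons (pv_pair _ _ _ (by decide)) ?_) y
    · -- rock = -1
      rw [show PySem.List.pyGet? pvROCKS (-1 : Int) = some ["##", "##"] from by decide,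
          show PySem.List.pyGet? pvROCK_WIDTHS (-1 : Int) = some (2 : Int) from by decide,
          show PySem.List.pyGet? pvROCK_MASKS (-1 : Int) = some [(96 : Int), (96 : Int)] from by decide]
      simp only [Option.getD_some]
      rw [show PySem.List.pyGet? (["##", "##"] : List String) (0 : Int) = some "##" from by decide]
      simp only []
      rw [show (PySem.Str.len "##" : Int) = 2 from by decide,
          show (["##", "##"] : List String).reverse = ["##", "##"] from by decide]
      split_ifs with hw
      · rfl
      · have h0 : 0 ≤ x + pattern := by omega
        have h1 : x + pattern ≤ 5 := by omega
        generalize hgen : x + pattern = s at h0 h1 ⊢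
        interval_cases s <;>
          exact pv_loop_eq _ pattern field _ _ (by repeat first
            | exact List.Forall₂.nil
            | refine List.Forall₂.cons (pv_pair _ _ _ (by decide)) ?_) y
    · -- rock = 0
      rw [show PySem.List.pyGet? pvROCKS (0 : Int) = some ["####"] from by decide,
          show PySem.List.pyGet? pvROCK_WIDTHS (0 : Int) = some (4 : Int) from by decide,
          show PySem.List.pyGet? pvROCK_MASKS (0 : Int) = some [(120 : Int)] from by decide]
      simp only [Option.getD_some]
      rw [show PySem.List.pyGet? (["####"] : List String) (0 : Int) = some "####" from by decide]
      simp only []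
      rw [show (PySem.Str.len "####" : Int) = 4 from by decide,
          show (["####"] : List String).reverse = ["####"] from by decide]
      split_ifs with hw
      · rfl
      · have h0 : 0 ≤ x + pattern := by omega
        have h1 : x + pattern ≤ 3 := by omega
        generalize hgen : x + pattern = s at h0 h1 ⊢
        interval_cases s <;>
          exact pv_loop_eq _ pattern field _ _ (by repeat first
            | exact List.Forall₂.nil
            | refine List.Forall₂.cons (pv_pair _ _ _ (by decide)) ?_) y
    · -- rock = 1
      rw [show PySem.List.pyGet? pvROCKS (1 : Int) = some [".#.", "###", ".#."] from by decide,
          show PySem.List.pyGet? pvROCK_WIDTHS (1 : Int) = some (3 : Int) from by decide,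
          show PySem.List.pyGet? pvROCK_MASKS (1 : Int) = some [(32 : Int), (112 : Int), (32 : Int)] from by decide]
      simp only [Option.getD_some]
      rw [show PySem.List.pyGet? ([".#.", "###", ".#."] : List String) (0 : Int) = some ".#." from by decide]
      simp only []
      rw [show (PySem.Str.len ".#." : Int) = 3 from by decide,
          show ([".#.", "###", ".#."] : List String).reverse = [".#.", "###", ".#."] from by decide]
      split_ifs with hw
      · rfl
      · have h0 : 0 ≤ x + pattern := by omega
        have h1 : x + pattern ≤ 4 := by omega
        generalize hgen : x + pattern = s at h0 h1 ⊢
        interval_cases s <;>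
          exact pv_loop_eq _ pattern field _ _ (by repeat first
            | exact List.Forall₂.nil
            | refine List.Forall₂.cons (pv_pair _ _ _ (by decide)) ?_) y
    · -- rock = 2
      rw [show PySem.List.pyGet? pvROCKS (2 : Int) = some ["..#", "..#", "###"] from by decide,
          show PySem.List.pyGet? pvROCK_WIDTHS (2 : Int) = some (3 : Int) from by decide,
          show PySem.List.pyGet? pvROCK_MASKS (2 : Int) = some [(112 : Int), (16 : Int), (16 : Int)] from by decide]
      simp only [Option.getD_some]
      rw [show PySem.List.pyGet? (["..#", "..#", "###"] : List String) (0 : Int) = some "..#" from by decide]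
      simp only []
      rw [show (PySem.Str.len "..#" : Int) = 3 from by decide,
          show (["..#", "..#", "###"] : List String).reverse = ["###", "..#", "..#"] from by decide]
      split_ifs with hw
      · rfl
      · have h0 : 0 ≤ x + pattern := by omega
        have h1 : x + pattern ≤ 4 := by omega
        generalize hgen : x + pattern = s at h0 h1 ⊢
        interval_cases s <;>
          exact pv_loop_eq _ pattern field _ _ (by repeat first
            | exact List.Forall₂.nil
            | refine List.Forall₂.cons (pv_pair _ _ _ (by decide)) ?_) y
    · -- rock = 3
      rw [show PySem.List.pyGet? pvROCKS (3 : Int) = some ["#", "#", "#", "#"] from by decide,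
          show PySem.List.pyGet? pvROCK_WIDTHS (3 : Int) = some (1 : Int) from by decide,
          show PySem.List.pyGet? pvROCK_MASKS (3 : Int) = some [(64 : Int), (64 : Int), (64 : Int), (64 : Int)] from by decide]
      simp only [Option.getD_some]
      rw [show PySem.List.pyGet? (["#", "#", "#", "#"] : List String) (0 : Int) = some "#" from by decide]
      simp only []
      rw [show (PySem.Str.len "#" : Int) = 1 from by decide,
          show (["#", "#", "#", "#"] : List String).reverse = ["#", "#", "#", "#"] from by decide]
      split_ifs with hw
      · rfl
      · have h0 : 0 ≤ x + pattern := by omega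
        have h1 : x + pattern ≤ 6 := by omega
        generalize hgen : x + pattern = s at h0 h1 ⊢
        interval_cases s <;>
          exact pv_loop_eq _ pattern field _ _ (by repeat first
            | exact List.Forall₂.nil
            | refine List.Forall₂.cons (pv_pair _ _ _ (by decide)) ?_) y
    · -- rock = 4
      rw [show PySem.List.pyGet? pvROCKS (4 : Int) = some ["##", "##"] from by decide,
          show PySem.List.pyGet? pvROCK_WIDTHS (4 : Int) = some (2 : Int) from by decide,
          show PySem.List.pyGet? pvROCK_MASKS (4 : Int) = some [(96 : Int), (96 : Int)] from by decide]
      simp only [Option.getD_some]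
      rw [show PySem.List.pyGet? (["##", "##"] : List String) (0 : Int) = some "##" from by decide]
      simp only []
      rw [show (PySem.Str.len "##" : Int) = 2 from by decide,
          show (["##", "##"] : List String).reverse = ["##", "##"] from by decide]
      split_ifs with hw
      · rfl
      · have h0 : 0 ≤ x + pattern := by omega
        have h1 : x + pattern ≤ 5 := by omega
        generalize hgen : x + pattern = s at h0 h1 ⊢
        interval_cases s <;>
          exact pv_loop_eq _ pattern field _ _ (by repeat first
            | exact List.Forall₂.nil
            | refine List.Forall₂.cons (pv_pair _ _ _ (by decide)) ?_) y
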